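-- pv_equiv track=rewrite | github.com/okuta/cupy | cupy/cuda/compiler.py | _convert_to_hip_source
-- ===== SOURCE A (Python) =====
-- def _convert_to_hip_source(source):
--     table = [
--         ('extern "C"', ''),
--         ('threadIdx.', 'hipThreadIdx_'),
--         ('blockIdx.', 'hipBlockIdx_'),
--         ('blockDim.', 'hipBlockDim_'),
--         ('gridDim.', 'hipGridDim_'),
--     ]
--     for i, j in table:
--         source = source.replace(i, j)
--     return source
-- ===== SOURCE B (Python) =====
-- def _convert_to_hip_source(source):
--     # remove extern "C" first (its removal may merge text into a new token,
--     # matching the sequential-replace semantics), then rewrite the four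
--     # builtin tokens in ONE left-to-right pass with a table lookup.
--     source = source.replace('extern "C"', '')
--     table = {
--         'threadIdx.': 'hipThreadIdx_',
--         'blockIdx.': 'hipBlockIdx_',
--         'blockDim.': 'hipBlockDim_',
--         'gridDim.': 'hipGridDim_',
--     }
--     out = []
--     i = 0
--     n = len(source)
--     while i < n:
--         for key, rep in table.items():
--             if source.startswith(key, i):
--                 out.append(rep)
--                 i += len(key)
--                 break
--         else:
--             out.append(source[i])
--             i += 1
--     return ''.join(out)
-- ===== Notes on version B (the rewrite author's own statement) =====
-- stated objective: alternative
-- what changed: A runs five sequential full-source replace passes; B keeps the extern "C" removal as a first pass (its deletion can merge text into a new token, matching sequential semantics) and then rewrites all four builtin tokens in ONE left-to-right scan with a table lookup instead of four more full passes.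
import Mathlib
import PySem

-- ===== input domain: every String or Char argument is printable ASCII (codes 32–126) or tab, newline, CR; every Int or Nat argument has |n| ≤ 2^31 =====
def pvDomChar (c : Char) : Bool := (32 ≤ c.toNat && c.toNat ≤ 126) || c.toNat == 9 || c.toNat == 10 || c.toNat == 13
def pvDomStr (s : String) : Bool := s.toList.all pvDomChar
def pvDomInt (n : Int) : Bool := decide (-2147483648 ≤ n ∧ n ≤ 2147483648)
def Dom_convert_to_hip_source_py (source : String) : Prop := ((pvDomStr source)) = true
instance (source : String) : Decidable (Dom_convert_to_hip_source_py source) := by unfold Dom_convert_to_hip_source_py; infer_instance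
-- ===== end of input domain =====

-- B replaces A's four sequential full-source scans for the builtin tokens by ONE
-- left-to-right pass with a table lookup (the extern "C" removal stays a separate
-- first step, since its removal can merge surrounding text into a new token).

-- ===== PORT A =====
-- A: for i, j in table: source = source.replace(i, j)
def convert_to_hip_source_py (source : String) : String :=
  let table : List (String × String) :=
    [("extern \"C\"", ""),
     ("threadIdx.", "hipThreadIdx_"),
     ("blockIdx.", "hipBlockIdx_"),
     ("blockDim.", "hipBlockDim_"),
     ("gridDim.", "hipGridDim_")]
  table.foldl (fun src ij => PySem.Str.replace src ij.1 ij.2) source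

-- ===== PORT B =====
-- B's while loop: at each position try the four keys in table order
-- (source.startswith(key, i)); on a hit emit the replacement and jump past the
-- key, otherwise emit the character and advance by one.
def hipAltGo : List Char → List Char
  | [] => []
  | c :: t =>
    if ("threadIdx.".toList).isPrefixOf (c :: t) then
      "hipThreadIdx_".toList ++ hipAltGo (t.drop 9)
    else if ("blockIdx.".toList).isPrefixOf (c :: t) then
      "hipBlockIdx_".toList ++ hipAltGo (t.drop 8)
    else if ("blockDim.".toList).isPrefixOf (c :: t) then
      "hipBlockDim_".toList ++ hipAltGo (t.drop 8)
    else if ("gridDim.".toList).isPrefixOf (c :: t) then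
      "hipGridDim_".toList ++ hipAltGo (t.drop 7)
    else
      c :: hipAltGo t
  termination_by l => l.length
  decreasing_by
    all_goals (simp [List.length_drop]; try omega)

def convert_to_hip_source_py_alt (source : String) : String :=
  let s1 := PySem.Str.replace source "extern \"C\"" ""
  String.ofList (hipAltGo s1.toList)

-- ===== PRECONDITION & SPEC =====
def Spec_convert_to_hip_source_py (source : String) (out : String) : Prop := out = convert_to_hip_source_py_alt source
instance (source : String) (out : String) : Decidable (Spec_convert_to_hip_source_py source out) := by unfold Spec_convert_to_hip_source_py; infer_instance

-- ===== CLAIM (what is proved, stated in full; the proofs are below) =====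
def Claim_equal_convert_to_hip_source_py : Prop := ∀ (source : String), Dom_convert_to_hip_source_py source → Spec_convert_to_hip_source_py source (convert_to_hip_source_py source)

-- ===== LEMMAS AND PROOFS =====

-- proof-side single-key scan; for nonempty k it characterises PySem.Chars.replace
def hipScan (k rep : List Char) : List Char → List Char
  | [] => []
  | c :: t =>
    if k.isPrefixOf (c :: t) then rep ++ hipScan k rep (t.drop (k.length - 1))
    else c :: hipScan k rep t
  termination_by l => l.length
  decreasing_by
    all_goals (simp [List.length_drop]; try omega)

theorem hipScan_go (k rep : List Char) (hk : k ≠ []) :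
    ∀ (fuel : Nat) (l acc : List Char), l.length ≤ fuel →
      PySem.Chars.replace.go k rep fuel l acc = acc.reverse ++ hipScan k rep l := by
  intro fuel
  induction fuel with
  | zero =>
    intro l acc hl
    have : l = [] := by cases l <;> simp_all
    subst this
    simp [PySem.Chars.replace.go, hipScan]
  | succ f ih =>
    intro l acc hl
    cases l with
    | nil => simp [PySem.Chars.replace.go, hipScan]
    | cons c t =>
      have hl' : t.length ≤ f := by simp at hl; omega
      have hk1 : 1 ≤ k.length := by cases k <;> simp_all
      by_cases h : k.isPrefixOf (c :: t)
      · have hdrop : (c :: t).drop k.length = t.drop (k.length - 1) := by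
          cases k with
          | nil => exact absurd rfl hk
          | cons a k' => simp
        rw [PySem.Chars.replace.go, if_pos h, hdrop,
            ih _ _ (by simp [List.length_drop]; omega)]
        rw [hipScan, if_pos h]
        simp
      · rw [PySem.Chars.replace.go, if_neg h, ih _ _ hl']
        rw [hipScan, if_neg h]
        simp

theorem replace_eq_hipScan (k rep l : List Char) (hk : k ≠ []) :
    PySem.Chars.replace l k rep = hipScan k rep l := by
  rw [PySem.Chars.replace]
  rw [if_neg (by simpa using hk)]
  simpa using hipScan_go k rep hk l.length l [] le_rfl

-- no occurrence of k starts strictly inside u (and none reaches past u's end)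
def hipSafe (k u : List Char) : Prop :=
  ∀ p, p < u.length → ¬ k <+: u.drop p ∧ ¬ u.drop p <+: k

theorem hipScan_append (k rep u X : List Char) (h : hipSafe k u) :
    hipScan k rep (u ++ X) = u ++ hipScan k rep X := by
  induction u with
  | nil => simp
  | cons a u' ih =>
    have h0 := h 0 (by simp)
    simp only [List.drop_zero] at h0
    have hnp : ¬ k.isPrefixOf (a :: (u' ++ X)) := by
      rw [List.isPrefixOf_iff_prefix]
      intro hpre
      rw [show a :: (u' ++ X) = (a :: u') ++ X from rfl] at hpre
      by_cases hlen : k.length ≤ (a :: u').length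
      · exact h0.1 ((List.isPrefix_append_of_length hlen).mp hpre)
      · exact h0.2
          (List.prefix_of_prefix_length_le (List.prefix_append _ _) hpre (by omega))
    rw [List.cons_append, hipScan, if_neg hnp]
    rw [ih (fun p hp => h (p + 1) (by simpa using Nat.succ_lt_succ hp))]
    simp

theorem hipScan_head (k rep X : List Char) (hk : k ≠ []) :
    hipScan k rep (k ++ X) = rep ++ hipScan k rep X := by
  cases k with
  | nil => exact absurd rfl hk
  | cons a k' =>
    rw [List.cons_append, hipScan,
        if_pos (by rw [List.isPrefixOf_iff_prefix]; exact ⟨X, by simp⟩)]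
    simp

-- a prefix not containing the replacement's head character survives a scan
theorem hipScan_prefix_rev (k r' : List Char) :
    ∀ (n : Nat) (u X : List Char), 'h' ∉ u → X.length ≤ n →
      u <+: hipScan k ('h' :: r') X → u <+: X := by
  intro n
  induction n with
  | zero =>
    intro u X hu hX
    have : X = [] := by cases X <;> simp_all
    subst this
    rw [hipScan]
    exact id
  | succ m ih =>
    intro u X hu hX
    cases X with
    | nil => rw [hipScan]; exact id
    | cons c t =>
      by_cases h : k.isPrefixOf (c :: t)
      · rw [hipScan, if_pos h]
        intro hp
        cases u with
        | nil => simp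
        | cons b u' =>
          rw [List.cons_append, List.cons_prefix_cons] at hp
          exact absurd (hp.1 ▸ List.mem_cons_self) hu
      · rw [hipScan, if_neg h]
        intro hp
        cases u with
        | nil => simp
        | cons b u' =>
          rw [List.cons_prefix_cons] at hp
          rw [List.cons_prefix_cons]
          exact ⟨hp.1, ih u' t
            (fun hm => hu (List.mem_cons_of_mem _ hm)) (by simp at hX; omega) hp.2⟩

-- the four-key chain of single-key scans equals B's fused one-pass rewrite
theorem hipChain_eq_altGo : ∀ (n : Nat) (t : List Char), t.length ≤ n →
    hipScan "gridDim.".toList "hipGridDim_".toList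
      (hipScan "blockDim.".toList "hipBlockDim_".toList
        (hipScan "blockIdx.".toList "hipBlockIdx_".toList
          (hipScan "threadIdx.".toList "hipThreadIdx_".toList t))) = hipAltGo t := by
  intro n
  induction n with
  | zero =>
    intro t ht
    have : t = [] := by cases t <;> simp_all
    subst this
    simp [hipScan, hipAltGo]
  | succ m ih =>
    intro t ht
    cases t with
    | nil => simp [hipScan, hipAltGo]
    | cons c r =>
    have htr : r.length ≤ m := by simp at ht; omega
    by_cases h1 : ("threadIdx.".toList).isPrefixOf (c :: r)
    · obtain ⟨s, hs⟩ := List.isPrefixOf_iff_prefix.mp h1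
      have hr : "hreadIdx.".toList ++ s = r := by
        have h' := hs
        rw [show ("threadIdx.".toList) = 't' :: "hreadIdx.".toList from by decide,
            List.cons_append] at h'
        injection h' with _ hr
      have hdrop : r.drop 9 = s := by
        rw [← hr, show (9 : Nat) = ("hreadIdx.".toList).length from by decide]
        exact List.drop_left
      rw [hipAltGo, if_pos h1, hdrop]
      rw [← hs, hipScan_head _ _ _ (by decide),
          hipScan_append _ _ _ _ (by unfold hipSafe; decide),
          hipScan_append _ _ _ _ (by unfold hipSafe; decide),
          hipScan_append _ _ _ _ (by unfold hipSafe; decide),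
          ih s (by rw [← hs] at ht; simp at ht; omega)]
    · by_cases h2 : ("blockIdx.".toList).isPrefixOf (c :: r)
      · obtain ⟨s, hs⟩ := List.isPrefixOf_iff_prefix.mp h2
        have hr : "lockIdx.".toList ++ s = r := by
          have h' := hs
          rw [show ("blockIdx.".toList) = 'b' :: "lockIdx.".toList from by decide,
              List.cons_append] at h'
          injection h' with _ hr
        have hdrop : r.drop 8 = s := by
          rw [← hr, show (8 : Nat) = ("lockIdx.".toList).length from by decide]
          exact List.drop_left
        rw [hipAltGo, if_neg h1, if_pos h2, hdrop]
        rw [← hs, hipScan_append _ _ _ _ (by unfold hipSafe; decide),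
            hipScan_head _ _ _ (by decide),
            hipScan_append _ _ _ _ (by unfold hipSafe; decide),
            hipScan_append _ _ _ _ (by unfold hipSafe; decide),
            ih s (by rw [← hs] at ht; simp at ht; omega)]
      · by_cases h3 : ("blockDim.".toList).isPrefixOf (c :: r)
        · obtain ⟨s, hs⟩ := List.isPrefixOf_iff_prefix.mp h3
          have hr : "lockDim.".toList ++ s = r := by
            have h' := hs
            rw [show ("blockDim.".toList) = 'b' :: "lockDim.".toList from by decide,
                List.cons_append] at h'
            injection h' with _ hr
          have hdrop : r.drop 8 = s := by
            rw [← hr, show (8 : Nat) = ("lockDim.".toList).length from by decide]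
            exact List.drop_left
          rw [hipAltGo, if_neg h1, if_neg h2, if_pos h3, hdrop]
          rw [← hs, hipScan_append _ _ _ _ (by unfold hipSafe; decide),
              hipScan_append _ _ _ _ (by unfold hipSafe; decide),
              hipScan_head _ _ _ (by decide),
              hipScan_append _ _ _ _ (by unfold hipSafe; decide),
              ih s (by rw [← hs] at ht; simp at ht; omega)]
        · by_cases h4 : ("gridDim.".toList).isPrefixOf (c :: r)
          · obtain ⟨s, hs⟩ := List.isPrefixOf_iff_prefix.mp h4
            have hr : "ridDim.".toList ++ s = r := by
              have h' := hs
              rw [show ("gridDim.".toList) = 'g' :: "ridDim.".toList from by decide,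
                  List.cons_append] at h'
              injection h' with _ hr
            have hdrop : r.drop 7 = s := by
              rw [← hr, show (7 : Nat) = ("ridDim.".toList).length from by decide]
              exact List.drop_left
            rw [hipAltGo, if_neg h1, if_neg h2, if_neg h3, if_pos h4, hdrop]
            rw [← hs, hipScan_append _ _ _ _ (by unfold hipSafe; decide),
                hipScan_append _ _ _ _ (by unfold hipSafe; decide),
                hipScan_append _ _ _ _ (by unfold hipSafe; decide),
                hipScan_head _ _ _ (by decide),
                ih s (by rw [← hs] at ht; simp at ht; omega)]
          · -- no key matches at the head: every scan steps over c
            have step1 : hipScan "threadIdx.".toList "hipThreadIdx_".toList (c :: r)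
                = c :: hipScan "threadIdx.".toList "hipThreadIdx_".toList r := by
              rw [hipScan, if_neg h1]
            have nb2 : ¬ ("blockIdx.".toList).isPrefixOf
                (c :: hipScan "threadIdx.".toList "hipThreadIdx_".toList r) := by
              rw [List.isPrefixOf_iff_prefix]
              intro hp
              rw [show ("blockIdx.".toList) = 'b' :: "lockIdx.".toList from rfl,
                  List.cons_prefix_cons] at hp
              have := hipScan_prefix_rev _ "ipThreadIdx_".toList r.length _ r (by decide) le_rfl hp.2
              exact h2 (by
                rw [List.isPrefixOf_iff_prefix,
                    show ("blockIdx.".toList) = 'b' :: "lockIdx.".toList from rfl,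
                    List.cons_prefix_cons]
                exact ⟨hp.1, this⟩)
            have step2 : hipScan "blockIdx.".toList "hipBlockIdx_".toList
                  (c :: hipScan "threadIdx.".toList "hipThreadIdx_".toList r)
                = c :: hipScan "blockIdx.".toList "hipBlockIdx_".toList
                    (hipScan "threadIdx.".toList "hipThreadIdx_".toList r) := by
              rw [hipScan, if_neg nb2]
            have nb3 : ¬ ("blockDim.".toList).isPrefixOf
                (c :: hipScan "blockIdx.".toList "hipBlockIdx_".toList
                    (hipScan "threadIdx.".toList "hipThreadIdx_".toList r)) := by
              rw [List.isPrefixOf_iff_prefix]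
              intro hp
              rw [show ("blockDim.".toList) = 'b' :: "lockDim.".toList from rfl,
                  List.cons_prefix_cons] at hp
              have := hipScan_prefix_rev _ "ipThreadIdx_".toList r.length _ r (by decide) le_rfl
                (hipScan_prefix_rev _ "ipBlockIdx_".toList _ _ _ (by decide) le_rfl hp.2)
              exact h3 (by
                rw [List.isPrefixOf_iff_prefix,
                    show ("blockDim.".toList) = 'b' :: "lockDim.".toList from rfl,
                    List.cons_prefix_cons]
                exact ⟨hp.1, this⟩)
            have step3 : hipScan "blockDim.".toList "hipBlockDim_".toList
                  (c :: hipScan "blockIdx.".toList "hipBlockIdx_".toList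
                    (hipScan "threadIdx.".toList "hipThreadIdx_".toList r))
                = c :: hipScan "blockDim.".toList "hipBlockDim_".toList
                    (hipScan "blockIdx.".toList "hipBlockIdx_".toList
                      (hipScan "threadIdx.".toList "hipThreadIdx_".toList r)) := by
              rw [hipScan, if_neg nb3]
            have nb4 : ¬ ("gridDim.".toList).isPrefixOf
                (c :: hipScan "blockDim.".toList "hipBlockDim_".toList
                    (hipScan "blockIdx.".toList "hipBlockIdx_".toList
                      (hipScan "threadIdx.".toList "hipThreadIdx_".toList r))) := by
              rw [List.isPrefixOf_iff_prefix]
              intro hp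
              rw [show ("gridDim.".toList) = 'g' :: "ridDim.".toList from rfl,
                  List.cons_prefix_cons] at hp
              have := hipScan_prefix_rev _ "ipThreadIdx_".toList r.length _ r (by decide) le_rfl
                (hipScan_prefix_rev _ "ipBlockIdx_".toList _ _ _ (by decide) le_rfl
                  (hipScan_prefix_rev _ "ipBlockDim_".toList _ _ _ (by decide) le_rfl hp.2))
              exact h4 (by
                rw [List.isPrefixOf_iff_prefix,
                    show ("gridDim.".toList) = 'g' :: "ridDim.".toList from rfl,
                    List.cons_prefix_cons]
                exact ⟨hp.1, this⟩)
            have step4 : hipScan "gridDim.".toList "hipGridDim_".toList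
                  (c :: hipScan "blockDim.".toList "hipBlockDim_".toList
                    (hipScan "blockIdx.".toList "hipBlockIdx_".toList
                      (hipScan "threadIdx.".toList "hipThreadIdx_".toList r)))
                = c :: hipScan "gridDim.".toList "hipGridDim_".toList
                    (hipScan "blockDim.".toList "hipBlockDim_".toList
                      (hipScan "blockIdx.".toList "hipBlockIdx_".toList
                        (hipScan "threadIdx.".toList "hipThreadIdx_".toList r))) := by
              rw [hipScan, if_neg nb4]
            rw [step1, step2, step3, step4, ih r htr]
            rw [hipAltGo, if_neg h1, if_neg h2, if_neg h3, if_neg h4]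

-- ===== VERDICT (by name: the statement is the Claim_ definition above) =====
theorem convert_to_hip_source_py_spec : Claim_equal_convert_to_hip_source_py := by
  intro source _
  unfold Spec_convert_to_hip_source_py convert_to_hip_source_py convert_to_hip_source_py_alt
  simp only [List.foldl]
  apply String.toList_inj.mp
  rw [String.toList_ofList]
  rw [PySem.Str.toList_replace, PySem.Str.toList_replace, PySem.Str.toList_replace,
      PySem.Str.toList_replace]
  rw [replace_eq_hipScan _ _ _ (by decide), replace_eq_hipScan _ _ _ (by decide),
      replace_eq_hipScan _ _ _ (by decide), replace_eq_hipScan _ _ _ (by decide)]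
  exact hipChain_eq_altGo _ _ le_rfl
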